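-- pv_equiv track=rewrite | github.com/genqiaolynn/sheet_resolve | ImageCorrection/utils/projection.py | segment_list
-- ===== SOURCE A (Python) =====
-- def segment_list(count_list, nonzero_min):
--     """
--     遍历各个被分割的字符位置
--     :param count_list:
--     :param nonzero_min:
--     :return:
--     """
--     begin, end = 0, 0
--     interval_list = []
--     idx = 1
--     while idx < len(count_list):
--         last_val = count_list[idx - 1]
--         now_val = count_list[idx]
--         if last_val < nonzero_min <= now_val:
--             begin = idx
--         if now_val < nonzero_min <= last_val:
--             end = idx
--             char_distance = end - begin
--             interval_list.append([begin, end, char_distance])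
--         idx += 1
--     return interval_list
-- ===== SOURCE B (Python) =====
-- def segment_list(count_list, nonzero_min):
--     intervals = []
--     start = None
--     for i, c in enumerate(count_list):
--         if c >= nonzero_min:
--             if start is None:
--                 start = i
--         elif start is not None:
--             intervals.append([start, i, i - start])
--             start = None
--     return intervals
-- ===== Notes on version B (the rewrite author's own statement) =====
-- stated objective: simpler
-- what changed: Replaces the pairwise edge-detection scan over (count[idx-1], count[idx]) with a single run-length scan over the elements themselves, tracking an optional run start and emitting a triple when a run is closed by a below-threshold element.
import Mathlib
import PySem

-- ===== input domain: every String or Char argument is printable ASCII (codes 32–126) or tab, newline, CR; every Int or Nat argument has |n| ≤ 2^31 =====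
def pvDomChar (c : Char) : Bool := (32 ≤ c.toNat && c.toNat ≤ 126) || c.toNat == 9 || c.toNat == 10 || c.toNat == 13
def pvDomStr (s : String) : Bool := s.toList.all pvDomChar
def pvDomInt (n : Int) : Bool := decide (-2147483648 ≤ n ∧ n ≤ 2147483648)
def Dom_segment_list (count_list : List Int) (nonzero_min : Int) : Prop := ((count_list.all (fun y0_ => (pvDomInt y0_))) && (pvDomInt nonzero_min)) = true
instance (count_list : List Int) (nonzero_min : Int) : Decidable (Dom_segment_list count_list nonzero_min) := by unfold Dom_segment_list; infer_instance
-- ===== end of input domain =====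

-- B replaces A's pairwise (last,now) edge-detection scan by a run-length scan over the
-- elements tracking an optional run start; objective: simpler.

-- ===== PORT A =====
-- while loop of A: idx runs from 1 while idx < len(count_list); state (begin, end, interval_list).
-- Python indices idx-1 and idx are always in range (1 ≤ idx < len), so getD 0 is exact.
def segA_loop (count_list : List Int) (nonzero_min : Int) (idx : Nat)
    (begin_ end_ : Int) (interval_list : List (List Int)) : List (List Int) :=
  if h : idx < count_list.length then
    let last_val := count_list.getD (idx - 1) 0
    let now_val := count_list.getD idx 0
    let begin_ := if last_val < nonzero_min ∧ nonzero_min ≤ now_val then (idx : Int) else begin_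
    if now_val < nonzero_min ∧ nonzero_min ≤ last_val then
      segA_loop count_list nonzero_min (idx + 1) begin_ (idx : Int)
        (interval_list ++ [[begin_, (idx : Int), (idx : Int) - begin_]])
    else
      segA_loop count_list nonzero_min (idx + 1) begin_ end_ interval_list
  else interval_list
termination_by count_list.length - idx

def segment_list (count_list : List Int) (nonzero_min : Int) : List (List Int) :=
  segA_loop count_list nonzero_min 1 0 0 []

-- ===== PORT B =====
-- run-length scan: 'start' is the start index of the current above-threshold run (none if below).
def segB_go (nonzero_min : Int) : List Int → Nat → Option Nat → List (List Int)
  | [], _, _ => []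
  | c :: rest, i, start =>
    if nonzero_min ≤ c then
      match start with
      | none => segB_go nonzero_min rest (i + 1) (some i)
      | some s => segB_go nonzero_min rest (i + 1) (some s)
    else
      match start with
      | some s => [(s : Int), (i : Int), (i : Int) - (s : Int)] :: segB_go nonzero_min rest (i + 1) none
      | none => segB_go nonzero_min rest (i + 1) none

def segment_list_alt (count_list : List Int) (nonzero_min : Int) : List (List Int) :=
  segB_go nonzero_min count_list 0 none

-- ===== PRECONDITION & SPEC =====
def Spec_segment_list (count_list : List Int) (nonzero_min : Int) (out : List (List Int)) : Prop := out = segment_list_alt count_list nonzero_min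
instance (count_list : List Int) (nonzero_min : Int) (out : List (List Int)) : Decidable (Spec_segment_list count_list nonzero_min out) := by unfold Spec_segment_list; infer_instance

-- ===== CLAIM (what is proved, stated in full; the proofs are below) =====
def Claim_equal_segment_list : Prop := ∀ (count_list : List Int) (nonzero_min : Int), Dom_segment_list count_list nonzero_min → Spec_segment_list count_list nonzero_min (segment_list count_list nonzero_min)

-- ===== LEMMAS AND PROOFS =====

-- Invariant linking A's index loop (state begin_) to B's suffix scan (state start):
-- start = some s ↔ the previous element is above threshold and begin_ = s.
theorem segA_eq_segB (nonzero_min : Int) :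
    ∀ (rest : List Int) (count_list : List Int) (i : Nat)
      (begin_ end_ : Int) (il : List (List Int)) (start : Option Nat),
      count_list.drop i = rest → 1 ≤ i →
      (match start with
       | some s => nonzero_min ≤ count_list.getD (i - 1) 0 ∧ begin_ = (s : Int)
       | none => count_list.getD (i - 1) 0 < nonzero_min) →
      segA_loop count_list nonzero_min i begin_ end_ il = il ++ segB_go nonzero_min rest i start := by
  intro rest
  induction rest with
  | nil =>
    intro cl i begin_ end_ il start hdrop _ _
    have hlen : cl.length ≤ i := by
      by_contra h
      have := List.drop_eq_nil_iff.mp hdrop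
      omega
    rw [segA_loop, segB_go]
    simp [Nat.not_lt.mpr hlen]
  | cons c rest ih =>
    intro cl i begin_ end_ il start hdrop hi hinv
    have hlt : i < cl.length := by
      by_contra h
      have : cl.drop i = [] := List.drop_eq_nil_iff.mpr (by omega)
      simp [this] at hdrop
    have hget : cl.getD i 0 = c := by
      have h0 : (cl.drop i)[0]? = some c := by rw [hdrop]; rfl
      rw [List.getElem?_drop, Nat.add_zero] at h0
      simp [List.getD, h0]
    have hdrop' : cl.drop (i + 1) = rest := by
      have h := List.drop_drop (l := cl) (i := 1) (j := i)
      rw [← h, hdrop]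
      rfl
    have hprev : cl.getD (i + 1 - 1) 0 = c := by simpa using hget
    rw [segA_loop]
    simp only [hlt, dif_pos, hget]
    cases start with
    | some s =>
      obtain ⟨habove, hbeg⟩ := hinv
      rw [segB_go]
      by_cases hc : nonzero_min ≤ c
      · -- run continues
        have h1 : ¬ (cl.getD (i - 1) 0 < nonzero_min ∧ nonzero_min ≤ c) := by
          intro ⟨h, _⟩; omega
        have h2 : ¬ (c < nonzero_min ∧ nonzero_min ≤ cl.getD (i - 1) 0) := by
          intro ⟨h, _⟩; omega
        simp only [if_neg h1, if_neg h2, if_pos hc]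
        exact ih cl (i + 1) begin_ end_ il (some s) hdrop' (by omega) ⟨by rwa [hprev], hbeg⟩
      · -- run falls: emit
        have h1 : ¬ (cl.getD (i - 1) 0 < nonzero_min ∧ nonzero_min ≤ c) := by
          intro ⟨_, h⟩; omega
        have h2 : (c < nonzero_min ∧ nonzero_min ≤ cl.getD (i - 1) 0) := ⟨by omega, habove⟩
        simp only [if_neg h1, if_pos h2, if_neg hc]
        rw [ih cl (i + 1) begin_ (i : Int) (il ++ [[begin_, (i : Int), (i : Int) - begin_]]) none
              hdrop' (by omega) (by rw [hprev]; omega), hbeg]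
        simp
    | none =>
      have hbelow : cl.getD (i - 1) 0 < nonzero_min := hinv
      rw [segB_go]
      by_cases hc : nonzero_min ≤ c
      · -- run starts
        have h1 : (cl.getD (i - 1) 0 < nonzero_min ∧ nonzero_min ≤ c) := ⟨hbelow, hc⟩
        have h2 : ¬ (c < nonzero_min ∧ nonzero_min ≤ cl.getD (i - 1) 0) := by
          intro ⟨_, h⟩; omega
        simp only [if_pos h1, if_neg h2, if_pos hc]
        exact ih cl (i + 1) (i : Int) end_ il (some i) hdrop' (by omega) ⟨by rwa [hprev], rfl⟩
      · -- stays below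
        have h1 : ¬ (cl.getD (i - 1) 0 < nonzero_min ∧ nonzero_min ≤ c) := by
          intro ⟨_, h⟩; omega
        have h2 : ¬ (c < nonzero_min ∧ nonzero_min ≤ cl.getD (i - 1) 0) := by
          intro ⟨_, h⟩; omega
        simp only [if_neg h1, if_neg h2, if_neg hc]
        exact ih cl (i + 1) begin_ end_ il none hdrop' (by omega) (by rw [hprev]; omega)

-- ===== VERDICT (by name: the statement is the Claim_ definition above) =====
theorem segment_list_spec : Claim_equal_segment_list := by
  unfold Claim_equal_segment_list
  intro cl nm _
  unfold Spec_segment_list segment_list segment_list_alt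
  cases cl with
  | nil => rw [segA_loop, segB_go]; simp
  | cons c rest =>
    rw [segB_go]
    by_cases hc : nm ≤ c
    · simp only [if_pos hc]
      exact (segA_eq_segB nm rest (c :: rest) 1 0 0 [] (some 0) rfl (le_refl 1)
        ⟨by simpa using hc, rfl⟩).trans (by simp)
    · simp only [if_neg hc]
      exact (segA_eq_segB nm rest (c :: rest) 1 0 0 [] none rfl (le_refl 1)
        (by simpa using (by omega : c < nm))).trans (by simp)
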